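-- pv_equiv track=rewrite | github.com/jylee425/algorithm_exercises | BOJ_18111.py | helper
-- ===== SOURCE A (Python) =====
-- def helper(N, M, board, target_height, B):
--     target_dig, target_fill = 0, 0
--
--     for y in range(N):
--         for x in range(M):
--             remaining = target_height - board[y][x]
--
--             if remaining < 0:
--                 target_dig -= remaining
--             else:
--                 target_fill += remaining
--
--     if target_fill > B + target_dig:
--         return -1
--     else:
--         return target_dig * 2 + target_fill
-- ===== SOURCE B (Python) =====
-- def helper(N, M, board, target_height, B):
--     # histogram of heights in the N x M region, then one aggregate over distinct heights
--     hist = {}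
--     for row in board[:max(N, 0)]:
--         for h in row[:max(M, 0)]:
--             hist[h] = hist.get(h, 0) + 1
--     dig = 0
--     fill = 0
--     for h, c in hist.items():
--         d = target_height - h
--         if d < 0:
--             dig += (-d) * c
--         else:
--             fill += d * c
--     if fill > B + dig:
--         return -1
--     return dig * 2 + fill
-- ===== Notes on version B (the rewrite author's own statement) =====
-- stated objective: alternative
-- what changed: B builds a height histogram (dict) over the N x M region in one pass, then computes dig/fill by aggregating over distinct heights weighted by their counts, instead of A's per-cell index-loop accumulation.
import Mathlib
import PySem

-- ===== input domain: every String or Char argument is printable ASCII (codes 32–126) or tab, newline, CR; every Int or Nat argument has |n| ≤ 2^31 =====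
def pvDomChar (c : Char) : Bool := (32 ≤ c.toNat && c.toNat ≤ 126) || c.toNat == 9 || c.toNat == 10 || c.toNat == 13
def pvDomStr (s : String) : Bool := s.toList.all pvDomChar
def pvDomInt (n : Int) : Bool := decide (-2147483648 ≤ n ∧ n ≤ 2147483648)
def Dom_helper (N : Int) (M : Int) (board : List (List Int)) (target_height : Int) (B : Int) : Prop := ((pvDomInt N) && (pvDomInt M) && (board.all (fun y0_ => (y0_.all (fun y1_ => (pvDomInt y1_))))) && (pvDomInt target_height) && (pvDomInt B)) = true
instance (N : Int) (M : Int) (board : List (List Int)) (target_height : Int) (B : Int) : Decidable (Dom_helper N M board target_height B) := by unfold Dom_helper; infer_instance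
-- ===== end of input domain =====

-- B replaces A's per-cell dig/fill accumulation by a height histogram built in one pass and a
-- count-weighted aggregation over the distinct heights (objective: alternative decomposition).

-- ===== PORT A =====
def helper (N : Int) (M : Int) (board : List (List Int)) (target_height : Int) (B : Int) : Int :=
  let res : Int × Int :=
    (PySem.List.pyRange 0 N 1).foldl
      (fun (s : Int × Int) y =>
        (PySem.List.pyRange 0 M 1).foldl
          (fun (s : Int × Int) x =>
            let remaining := target_height - PySem.List.pyGetD (PySem.List.pyGetD board y []) x 0
            if remaining < 0 then (s.1 - remaining, s.2) else (s.1, s.2 + remaining))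
          s)
      (0, 0)
  if res.2 > B + res.1 then -1 else res.1 * 2 + res.2

-- ===== PORT B =====
def helper_alt (N : Int) (M : Int) (board : List (List Int)) (target_height : Int) (B : Int) : Int :=
  let hist : PySem.Dict Int Int :=
    (PySem.List.slice board none (some (max N 0))).foldl
      (fun (d : PySem.Dict Int Int) row =>
        (PySem.List.slice row none (some (max M 0))).foldl
          (fun (d : PySem.Dict Int Int) h => d.insert h (d.getD h 0 + 1))
          d)
      PySem.Dict.empty
  let res : Int × Int :=
    hist.items.foldl
      (fun (s : Int × Int) p =>
        let d := target_height - p.1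
        if d < 0 then (s.1 + (-d) * p.2, s.2) else (s.1, s.2 + d * p.2))
      (0, 0)
  if res.2 > B + res.1 then -1 else res.1 * 2 + res.2

-- ===== PRECONDITION & SPEC =====
-- Pre_ excludes exactly the inputs where A raises IndexError: with a positive column count M,
-- A indexes board[y] for every y < N and board[y][x] for every x < M, so those indices must exist.
def Pre_helper (N : Int) (M : Int) (board : List (List Int)) (_target_height : Int) (_B : Int) : Prop :=
  0 < M → (N ≤ (board.length : Int) ∧ ∀ row ∈ board.take N.toNat, M ≤ (row.length : Int))
instance (N : Int) (M : Int) (board : List (List Int)) (target_height : Int) (B : Int) : Decidable (Pre_helper N M board target_height B) := by unfold Pre_helper; infer_instance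

def pvWitness_helper : Int × Int × List (List Int) × Int × Int := (2, 2, [[1, 2], [3, 4]], 2, 10)

def Spec_helper (N : Int) (M : Int) (board : List (List Int)) (target_height : Int) (B : Int) (out : Int) : Prop := out = helper_alt N M board target_height B
instance (N : Int) (M : Int) (board : List (List Int)) (target_height : Int) (B : Int) (out : Int) : Decidable (Spec_helper N M board target_height B out) := by unfold Spec_helper; infer_instance

-- ===== CLAIM (what is proved, stated in full; the proofs are below) =====
def Claim_equal_helper : Prop := ∀ (N : Int) (M : Int) (board : List (List Int)) (target_height : Int) (B : Int), Dom_helper N M board target_height B → Pre_helper N M board target_height B → Spec_helper N M board target_height B (helper N M board target_height B)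

-- ===== LEMMAS AND PROOFS =====

-- per-cell contribution to dig / fill
def pvDig (t h : Int) : Int := if t - h < 0 then h - t else 0
def pvFill (t h : Int) : Int := if t - h < 0 then 0 else t - h

-- the N×M region as one flat list of heights
def pvCells (N M : Int) (board : List (List Int)) : List Int :=
  (board.take N.toNat).flatMap (fun row => row.take M.toNat)

-- A's accumulator over one row, under the row-length precondition, is a fold over the row's first M cells
theorem pvA_inner (M t : Int) (row : List Int) (s : Int × Int)
    (h : 0 < M → M ≤ (row.length : Int)) :
    (PySem.List.pyRange 0 M 1).foldl
      (fun (s : Int × Int) x =>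
        let remaining := t - PySem.List.pyGetD row x 0
        if remaining < 0 then (s.1 - remaining, s.2) else (s.1, s.2 + remaining)) s
    = (row.take M.toNat).foldl
        (fun (s : Int × Int) h =>
          let remaining := t - h
          if remaining < 0 then (s.1 - remaining, s.2) else (s.1, s.2 + remaining)) s := by
  by_cases hM : M ≤ 0
  · rw [PySem.List.pyRange_one_eq_nil (by omega)]
    have : M.toNat = 0 := by omega
    simp [this]
  · have hlen : ((row.take M.toNat).length : Int) = M := by
      simp [List.length_take]; omega
    have := PySem.List.foldl_pyRange_zero_pyGetD' (row.take M.toNat) 0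
      (fun (s : Int × Int) h =>
        let remaining := t - h
        if remaining < 0 then (s.1 - remaining, s.2) else (s.1, s.2 + remaining)) s
    rw [hlen] at this
    rw [← this]
    apply PySem.List.foldl_congr_mem
    intro acc x hx
    have hx' := (PySem.List.mem_pyRange_one).mp hx
    have hgd : PySem.List.pyGetD row x 0 = PySem.List.pyGetD (row.take M.toNat) x 0 := by
      rw [PySem.List.pyGetD_of_nonneg _ _ hx'.1, PySem.List.pyGetD_of_nonneg _ _ hx'.1]
      rw [List.getD_eq_getElem?_getD, List.getD_eq_getElem?_getD, List.getElem?_take]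
      have : x.toNat < M.toNat := by omega
      simp [this]
    rw [hgd]

-- A's double loop, under Pre_, is a fold of the cell step over pvCells
theorem pvA_loop (N M t : Int) (board : List (List Int))
    (hPre : 0 < M → (N ≤ (board.length : Int) ∧ ∀ row ∈ board.take N.toNat, M ≤ (row.length : Int))) :
    (PySem.List.pyRange 0 N 1).foldl
      (fun (s : Int × Int) y =>
        (PySem.List.pyRange 0 M 1).foldl
          (fun (s : Int × Int) x =>
            let remaining := t - PySem.List.pyGetD (PySem.List.pyGetD board y []) x 0
            if remaining < 0 then (s.1 - remaining, s.2) else (s.1, s.2 + remaining))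
          s) (0, 0)
    = (pvCells N M board).foldl
        (fun (s : Int × Int) h =>
          let remaining := t - h
          if remaining < 0 then (s.1 - remaining, s.2) else (s.1, s.2 + remaining)) (0, 0) := by
  by_cases hM : M ≤ 0
  · have h0 : M.toNat = 0 := by omega
    simp [PySem.List.pyRange_one_eq_nil hM, pvCells, h0, List.foldl_fixed,
      List.flatMap_eq_nil_iff.mpr (fun x _ => rfl)]
  · obtain ⟨hN, hrows⟩ := hPre (by omega)
    by_cases hN0 : N ≤ 0
    · have h0 : N.toNat = 0 := by omega
      rw [PySem.List.pyRange_one_eq_nil hN0]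
      simp [pvCells, h0]
    · have hlen : (((board.take N.toNat).length : Nat) : Int) = N := by
        simp [List.length_take]; omega
      rw [PySem.List.foldl_congr_mem _ _
          (fun (s : Int × Int) y =>
            (PySem.List.pyRange 0 M 1).foldl
              (fun (s : Int × Int) x =>
                let remaining := t - PySem.List.pyGetD (PySem.List.pyGetD (board.take N.toNat) y []) x 0
                if remaining < 0 then (s.1 - remaining, s.2) else (s.1, s.2 + remaining))
              s) _ ?_]
      · have hmain := PySem.List.foldl_pyRange_zero_pyGetD' (board.take N.toNat) ([] : List Int)
          (fun (s : Int × Int) row =>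
            (PySem.List.pyRange 0 M 1).foldl
              (fun (s : Int × Int) x =>
                let remaining := t - PySem.List.pyGetD row x 0
                if remaining < 0 then (s.1 - remaining, s.2) else (s.1, s.2 + remaining))
              s) (0, 0)
        rw [hlen] at hmain
        rw [hmain]
        rw [PySem.List.foldl_congr_mem _ _
            (fun (s : Int × Int) row =>
              (row.take M.toNat).foldl
                (fun (s : Int × Int) h =>
                  let remaining := t - h
                  if remaining < 0 then (s.1 - remaining, s.2) else (s.1, s.2 + remaining))
                s) _ ?_]
        · exact (List.foldl_flatMap).symm
        · intro acc row hrow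
          exact pvA_inner M t row acc (fun _ => hrows row hrow)
      · intro acc y hy
        have hy' := (PySem.List.mem_pyRange_one).mp hy
        have hgd : PySem.List.pyGetD board y [] = PySem.List.pyGetD (board.take N.toNat) y [] := by
          rw [PySem.List.pyGetD_of_nonneg _ _ hy'.1, PySem.List.pyGetD_of_nonneg _ _ hy'.1]
          rw [List.getD_eq_getElem?_getD, List.getD_eq_getElem?_getD, List.getElem?_take]
          have : y.toNat < N.toNat := by omega
          simp [this]
        rw [hgd]

-- B's histogram is the counter of pvCells
theorem pvB_hist (N M : Int) (board : List (List Int)) :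
    (PySem.List.slice board none (some (max N 0))).foldl
      (fun (d : PySem.Dict Int Int) row =>
        (PySem.List.slice row none (some (max M 0))).foldl
          (fun (d : PySem.Dict Int Int) h => d.insert h (d.getD h 0 + 1)) d)
      PySem.Dict.empty
    = PySem.Dict.counter (pvCells N M board) := by
  have h1 : (max N 0).toNat = N.toNat := by omega
  have h2 : (max M 0).toNat = M.toNat := by omega
  rw [PySem.List.slice_to board (le_max_right N 0), h1]
  rw [PySem.List.foldl_congr_mem _ _
      (fun (d : PySem.Dict Int Int) row =>
        (row.take M.toNat).foldl
          (fun (d : PySem.Dict Int Int) h => d.insert h (d.getD h 0 + 1)) d) _ ?_]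
  · rw [← List.foldl_flatMap]
    exact PySem.Dict.foldl_insert_getD_add_one_eq_counter (pvCells N M board)
  · intro d row _
    rw [PySem.List.slice_to row (le_max_right M 0), h2]

-- count-weighted sum over the distinct elements equals the plain sum
theorem pvWeighted_sum (g : Int → Int) (xs : List Int) :
    ((PySem.Set.ofList xs).map (fun k => g k * (xs.count k : Int))).sum = (xs.map g).sum := by
  classical
  have hperm : (PySem.Set.ofList xs).Perm xs.dedup :=
    (List.perm_ext_iff_of_nodup (PySem.Set.nodup_ofList xs) (List.nodup_dedup xs)).mpr
      (fun a => by simp [PySem.Set.mem_ofList])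
  rw [(hperm.map _).sum_eq]
  have hdtf : xs.dedup.toFinset = xs.toFinset := by simp [Finset.ext_iff]
  have hfin : (xs.dedup.map (fun k => g k * (xs.count k : Int))).sum
      = ∑ k ∈ xs.toFinset, g k * (xs.count k : Int) := by
    rw [← hdtf]
    exact (List.sum_toFinset _ (List.nodup_dedup xs)).symm
  rw [hfin]
  have hms : (xs.map g).sum = ((↑xs : Multiset Int).map g).sum := by simp
  rw [hms, Finset.sum_multiset_map_count]
  rw [List.toFinset_coe]
  apply Finset.sum_congr rfl
  intro k _
  rw [Multiset.coe_count, nsmul_eq_mul, mul_comm]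

-- a cell-step fold is the pair of dig/fill sums
theorem pvCell_fold (t : Int) (xs : List Int) :
    xs.foldl
      (fun (s : Int × Int) h =>
        let remaining := t - h
        if remaining < 0 then (s.1 - remaining, s.2) else (s.1, s.2 + remaining)) (0, 0)
    = ((xs.map (pvDig t)).sum, (xs.map (pvFill t)).sum) := by
  have hfun : (fun (s : Int × Int) h =>
        let remaining := t - h
        if remaining < 0 then (s.1 - remaining, s.2) else (s.1, s.2 + remaining))
      = (fun (s : Int × Int) h => (s.1 + pvDig t h, s.2 + pvFill t h)) := by
    funext s h
    simp only [pvDig, pvFill]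
    split_ifs with h
    · simp only [Prod.mk.injEq]; constructor <;> ring
    · simp
  rw [hfun, PySem.List.foldl_prod_mk (f := fun (a : Int) h => a + pvDig t h) (g := fun (a : Int) h => a + pvFill t h),
    PySem.List.foldl_add, PySem.List.foldl_add]
  simp

-- B's aggregation over counter items is the pair of dig/fill sums
theorem pvB_fold (t : Int) (xs : List Int) :
    (PySem.Dict.counter xs).items.foldl
      (fun (s : Int × Int) p =>
        let d := t - p.1
        if d < 0 then (s.1 + (-d) * p.2, s.2) else (s.1, s.2 + d * p.2)) (0, 0)
    = ((xs.map (pvDig t)).sum, (xs.map (pvFill t)).sum) := by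
  have hfun : (fun (s : Int × Int) (p : Int × Int) =>
        let d := t - p.1
        if d < 0 then (s.1 + (-d) * p.2, s.2) else (s.1, s.2 + d * p.2))
      = (fun (s : Int × Int) p => (s.1 + pvDig t p.1 * p.2, s.2 + pvFill t p.1 * p.2)) := by
    funext s p
    simp only [pvDig, pvFill]
    split_ifs with h
    · simp only [Prod.mk.injEq]; constructor <;> ring
    · simp
  rw [hfun, PySem.List.foldl_prod_mk (f := fun (a : Int) (p : Int × Int) => a + pvDig t p.1 * p.2)
        (g := fun (a : Int) (p : Int × Int) => a + pvFill t p.1 * p.2),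
      PySem.List.foldl_add, PySem.List.foldl_add]
  rw [PySem.Dict.items_counter]
  simp only [List.map_map, Function.comp_def]
  rw [pvWeighted_sum (pvDig t) xs, pvWeighted_sum (pvFill t) xs]
  simp

-- ===== VERDICT (by name: the statement is the Claim_ definition above) =====
theorem helper_spec : Claim_equal_helper := by
  intro N M board t B _ hPre
  unfold Spec_helper helper helper_alt
  simp only [pvA_loop N M t board hPre, pvB_hist, pvCell_fold, pvB_fold]
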